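-- pv_equiv track=rewrite | github.com/Arwa119/DSA-Problems | Week1/funcs.py | Sort10
-- ===== SOURCE A (Python) =====
-- def Sort10(Arr):
--     arr_g = []
--     arr_s = []
--     for i in range(len(Arr)):
--         if Arr[i]>=0:
--             arr_g.append(Arr[i])
--         if Arr[i]<0:
--             arr_s.append(Arr[i])
--
--     arr_g.sort()
--     arr_s.sort()
--     final = []
--     for i in range(len(Arr)):
--         if i>len(arr_s) and i>len(arr_g):
--             break
--         if i<len(arr_s):
--             final.append(arr_s[i])
--         if i<len(arr_g):
--             final.append(arr_g[i])
--     return final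
-- ===== SOURCE B (Python) =====
-- def Sort10(Arr):
--     S = sorted(Arr)
--     k = sum(1 for x in Arr if x < 0)
--     neg, pos = S[:k], S[k:]
--     res = []
--     for a, b in zip(neg, pos):
--         res.append(a)
--         res.append(b)
--     m = min(len(neg), len(pos))
--     res.extend(neg[m:])
--     res.extend(pos[m:])
--     return res
-- ===== Notes on version B (the rewrite author's own statement) =====
-- stated objective: alternative
-- what changed: B sorts the whole list once and slices it at the negative count to get both sorted halves (instead of A's partition-then-two-sorts), and interleaves them with a zip loop plus remainders instead of A's indexed loop with a break.
import Mathlib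
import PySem

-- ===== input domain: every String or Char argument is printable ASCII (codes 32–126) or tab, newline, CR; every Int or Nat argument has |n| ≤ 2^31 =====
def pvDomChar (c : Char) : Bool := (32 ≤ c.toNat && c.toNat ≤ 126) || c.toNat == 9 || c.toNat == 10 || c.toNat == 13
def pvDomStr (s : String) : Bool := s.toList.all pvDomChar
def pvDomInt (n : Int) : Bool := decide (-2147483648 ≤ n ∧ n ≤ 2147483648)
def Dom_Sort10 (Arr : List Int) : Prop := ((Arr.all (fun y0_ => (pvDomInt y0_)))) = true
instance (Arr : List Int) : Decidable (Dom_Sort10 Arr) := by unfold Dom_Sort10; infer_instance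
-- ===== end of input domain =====

-- B derives both sorted halves from ONE full sort (slice at the negative count) and
-- interleaves with a zip loop, instead of A's partition-then-two-sorts with an indexed loop.

-- ===== PORT A =====
-- the second loop of A: indexed loop with the (unreachable-effect) break condition
def Sort10_loop2 (s g : List Int) (i n : Nat) : List Int :=
  if i < n then
    if s.length < i ∧ g.length < i then []
    else
      (if i < s.length then [s.getD i 0] else []) ++
      (if i < g.length then [g.getD i 0] else []) ++
      Sort10_loop2 s g (i + 1) n
  else []
termination_by n - i

def Sort10 (Arr : List Int) : List Int :=
  let p := (PySem.List.pyRange 0 Arr.length 1).foldl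
    (fun (acc : List Int × List Int) i =>
      let x := PySem.List.pyGetD Arr i 0
      let acc := if x ≥ 0 then (acc.1 ++ [x], acc.2) else acc
      if x < 0 then (acc.1, acc.2 ++ [x]) else acc) ([], [])
  let arr_g := PySem.List.sorted p.1 (fun x => x) false
  let arr_s := PySem.List.sorted p.2 (fun x => x) false
  Sort10_loop2 arr_s arr_g 0 Arr.length

-- ===== PORT B =====
def Sort10_alt (Arr : List Int) : List Int :=
  let S := PySem.List.sorted Arr (fun x => x) false
  let k : Int := Arr.foldl (fun acc x => if x < 0 then acc + 1 else acc) 0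
  let neg := PySem.List.slice S none (some k)
  let pos := PySem.List.slice S (some k) none
  let res := (neg.zip pos).foldl (fun acc p => acc ++ [p.1, p.2]) []
  let m := min neg.length pos.length
  (res ++ neg.drop m) ++ pos.drop m

-- ===== PRECONDITION & SPEC =====
def Spec_Sort10 (Arr : List Int) (out : List Int) : Prop := out = Sort10_alt Arr
instance (Arr : List Int) (out : List Int) : Decidable (Spec_Sort10 Arr out) := by unfold Spec_Sort10; infer_instance

-- ===== CLAIM (what is proved, stated in full; the proofs are below) =====
def Claim_equal_Sort10 : Prop := ∀ (Arr : List Int), Dom_Sort10 Arr → Spec_Sort10 Arr (Sort10 Arr)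

-- ===== LEMMAS AND PROOFS =====

-- plain interleaving, the common normal form of both loops
def itl : List Int → List Int → List Int
  | [], g => g
  | s, [] => s
  | a :: s, b :: g => a :: b :: itl s g

theorem itl_nil_right (s : List Int) : itl s [] = s := by
  cases s <;> rfl

-- A's indexed loop computes itl of the drops
theorem loop2_eq_itl (s g : List Int) (i n : Nat) (hs : s.length ≤ n) (hg : g.length ≤ n) :
    Sort10_loop2 s g i n = itl (s.drop i) (g.drop i) := by
  rw [Sort10_loop2]
  by_cases h1 : i < n
  · simp only [if_pos h1]
    by_cases hb : s.length < i ∧ g.length < i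
    · simp only [if_pos hb]
      rw [List.drop_eq_nil_of_le (le_of_lt hb.1), List.drop_eq_nil_of_le (le_of_lt hb.2)]
      rfl
    · simp only [if_neg hb]
      rw [loop2_eq_itl s g (i + 1) n hs hg]
      by_cases h2 : i < s.length <;> by_cases h3 : i < g.length
      · rw [List.drop_eq_getElem_cons h2, List.drop_eq_getElem_cons h3]
        simp [h2, h3, itl]
      · have hg0 : g.drop i = [] := List.drop_eq_nil_of_le (le_of_not_gt h3)
        have hg1 : g.drop (i + 1) = [] := List.drop_eq_nil_of_le (by omega)
        rw [List.drop_eq_getElem_cons h2]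
        simp [h2, h3, hg0, hg1, itl_nil_right]
      · have hs0 : s.drop i = [] := List.drop_eq_nil_of_le (le_of_not_gt h2)
        have hs1 : s.drop (i + 1) = [] := List.drop_eq_nil_of_le (by omega)
        rw [List.drop_eq_getElem_cons h3]
        simp [h2, h3, hs0, hs1, itl]
      · have hs0 : s.drop i = [] := List.drop_eq_nil_of_le (le_of_not_gt h2)
        have hs1 : s.drop (i + 1) = [] := List.drop_eq_nil_of_le (by omega)
        have hg0 : g.drop i = [] := List.drop_eq_nil_of_le (le_of_not_gt h3)
        have hg1 : g.drop (i + 1) = [] := List.drop_eq_nil_of_le (by omega)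
        simp [h2, h3, hs0, hs1, hg0, hg1, itl]
  · simp only [if_neg h1]
    rw [List.drop_eq_nil_of_le (by omega), List.drop_eq_nil_of_le (by omega)]
    rfl
termination_by n - i

-- B's zip loop + remainders computes itl
theorem zip_eq_itl (s g : List Int) (acc : List Int) :
    ((s.zip g).foldl (fun acc p => acc ++ [p.1, p.2]) acc ++ s.drop (min s.length g.length)) ++
      g.drop (min s.length g.length) = acc ++ itl s g := by
  induction s generalizing g acc with
  | nil => simp [itl]
  | cons a s ih =>
    cases g with
    | nil => simp [itl_nil_right]
    | cons b g =>
      have hmin : min (a :: s).length (b :: g).length = min s.length g.length + 1 := by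
        simp [Nat.succ_min_succ]
      simp only [List.zip_cons_cons, List.foldl_cons, hmin, List.drop_succ_cons]
      rw [ih g (acc ++ [a, b])]
      simp [itl]

-- A's first loop is the two filters
theorem partition_eq (Arr : List Int) :
    (PySem.List.pyRange 0 Arr.length 1).foldl
      (fun (acc : List Int × List Int) i =>
        let x := PySem.List.pyGetD Arr i 0
        let acc := if x ≥ 0 then (acc.1 ++ [x], acc.2) else acc
        if x < 0 then (acc.1, acc.2 ++ [x]) else acc) ([], []) =
    (Arr.filter (fun x => decide (0 ≤ x)), Arr.filter (fun x => decide (x < 0))) := by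
  rw [PySem.List.foldl_pyRange_zero_pyGetD' Arr 0
    (fun (acc : List Int × List Int) x =>
      let acc := if x ≥ 0 then (acc.1 ++ [x], acc.2) else acc
      if x < 0 then (acc.1, acc.2 ++ [x]) else acc) ([], [])]
  suffices h : ∀ (l : List Int) (g0 s0 : List Int),
      l.foldl (fun (acc : List Int × List Int) x =>
        let acc := if x ≥ 0 then (acc.1 ++ [x], acc.2) else acc
        if x < 0 then (acc.1, acc.2 ++ [x]) else acc) (g0, s0) =
      (g0 ++ l.filter (fun x => decide (0 ≤ x)), s0 ++ l.filter (fun x => decide (x < 0))) by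
    simpa using h Arr [] []
  intro l
  induction l with
  | nil => simp
  | cons x l ih =>
    intro g0 s0
    by_cases hx : 0 ≤ x
    · have hx' : ¬ x < 0 := by omega
      simp [hx, hx', ih]
    · have hx' : x < 0 := by omega
      simp [hx, hx', ih]

-- B's count is the length of the negative filter
theorem count_eq (Arr : List Int) :
    Arr.foldl (fun acc x => if x < 0 then acc + 1 else acc) (0 : Int) =
      ((Arr.filter (fun x => decide (x < 0))).length : Int) := by
  suffices h : ∀ (l : List Int) (c : Int),
      l.foldl (fun acc x => if x < 0 then acc + 1 else acc) c =
        c + ((l.filter (fun x => decide (x < 0))).length : Int) by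
    simpa using h Arr 0
  intro l
  induction l with
  | nil => simp
  | cons x l ih =>
    intro c
    by_cases hx : x < 0
    · simp [hx, ih]
      ring
    · simp [hx, ih]

-- ONE full sort splits as the two sorted halves
theorem sorted_split (Arr : List Int) :
    PySem.List.sorted Arr (fun x => x) false =
      PySem.List.sorted (Arr.filter (fun x => decide (x < 0))) (fun x => x) false ++
      PySem.List.sorted (Arr.filter (fun x => decide (0 ≤ x))) (fun x => x) false := by
  have hfe : Arr.filter (fun x => !decide (x < 0)) = Arr.filter (fun x => decide (0 ≤ x)) := by
    apply List.filter_congr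
    intro x _
    by_cases hx : x < 0
    · simp [hx]
    · simp [hx]
      omega
  have hperm : (PySem.List.sorted (Arr.filter (fun x => decide (x < 0))) (fun x => x) false ++
      PySem.List.sorted (Arr.filter (fun x => decide (0 ≤ x))) (fun x => x) false).Perm Arr := by
    refine ((PySem.List.sorted_perm _ _ _).append (PySem.List.sorted_perm _ _ _)).trans ?_
    rw [← hfe]
    exact List.filter_append_perm _ Arr
  have hpair : (PySem.List.sorted (Arr.filter (fun x => decide (x < 0))) (fun x => x) false ++
      PySem.List.sorted (Arr.filter (fun x => decide (0 ≤ x))) (fun x => x) false).Pairwise (· ≤ ·) := by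
    rw [List.pairwise_append]
    refine ⟨PySem.List.sorted_pairwise _ _, PySem.List.sorted_pairwise _ _, ?_⟩
    intro a ha b hb
    have ha' : a < 0 := by
      have := (PySem.List.mem_sorted _ _ _ _).mp ha
      simpa using (List.mem_filter.mp this).2
    have hb' : 0 ≤ b := by
      have := (PySem.List.mem_sorted _ _ _ _).mp hb
      simpa using (List.mem_filter.mp this).2
    omega
  exact PySem.List.sorted_id_eq_of_perm_of_pairwise _ _ hperm hpair

-- ===== VERDICT (by name: the statement is the Claim_ definition above) =====
theorem Sort10_spec : Claim_equal_Sort10 := by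
  intro Arr _
  unfold Spec_Sort10 Sort10 Sort10_alt
  simp only [partition_eq, count_eq]
  rw [sorted_split Arr, PySem.List.slice_to_natCast, PySem.List.slice_from_natCast,
    List.take_left' (by rw [PySem.List.length_sorted]),
    List.drop_left' (by rw [PySem.List.length_sorted])]
  rw [zip_eq_itl, List.nil_append,
    loop2_eq_itl _ _ 0 Arr.length
      (by rw [PySem.List.length_sorted]; exact (List.length_filter_le _ _))
      (by rw [PySem.List.length_sorted]; exact (List.length_filter_le _ _))]
  simp
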